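-- pv_equiv track=rewrite | github.com/r1cc4rdo/daily_coding_problem | legacy/daily_coding_problem_21_25.py | coding_problem_21
-- ===== SOURCE A (Python) =====
-- def coding_problem_21(times):
--     """
--     Given an array of time intervals (start, end) for classroom lectures (possibly overlapping),
--     find the minimum number of rooms required.
--     Example:
--
--     >>> coding_problem_21([(30, 75), (0, 50), (60, 150)])
--     2
--     """
--     start_times = [(t[0], 1) for t in times]  # [(30, 1), (0, 1), (60, 1)]
--     end_times = [(t[1], -1) for t in times]  # [(75, -1), (50, -1), (150, -1)]
--     room_allocation = [t[1] for t in sorted(start_times + end_times, key=lambda t: t[0])]  # [1, 1, -1, 1, -1, -1]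
--
--     rooms, max_rooms = 0, 0
--     for event in room_allocation:
--         rooms += event  # occupied or released
--         max_rooms = max(max_rooms, rooms)
--     assert(rooms == 0)
--
--     return max_rooms
-- ===== SOURCE B (Python) =====
-- def coding_problem_21(times):
--     max_rooms = 0
--     for t in times:
--         rooms = sum(1 for u in times if u[0] <= t[0]) - sum(1 for u in times if u[1] < t[0])
--         if rooms > max_rooms:
--             max_rooms = rooms
--     return max_rooms
-- ===== Notes on version B (the rewrite author's own statement) =====
-- stated objective: alternative
-- what changed: B eliminates A's sort-and-sweep entirely: instead of sorting 2n tagged (time, +/-1) events and taking the max of a running sum, it directly counts, for each lecture start s, how many lectures are in session at s (start <= s minus end < s) and returns the maximum of those counts.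
import Mathlib
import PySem

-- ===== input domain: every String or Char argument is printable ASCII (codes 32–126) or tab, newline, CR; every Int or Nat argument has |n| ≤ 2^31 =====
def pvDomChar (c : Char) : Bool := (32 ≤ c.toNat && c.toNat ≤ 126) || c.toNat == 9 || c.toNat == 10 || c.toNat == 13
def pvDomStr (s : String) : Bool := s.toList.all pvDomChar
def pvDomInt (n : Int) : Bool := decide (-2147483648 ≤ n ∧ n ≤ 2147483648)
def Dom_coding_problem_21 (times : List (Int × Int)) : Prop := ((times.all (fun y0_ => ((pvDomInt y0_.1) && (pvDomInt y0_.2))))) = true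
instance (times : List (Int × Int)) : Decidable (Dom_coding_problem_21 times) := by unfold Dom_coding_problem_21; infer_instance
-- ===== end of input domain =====

-- B drops A's sort-and-sweep of ±1 events: it directly counts, for each lecture
-- start s, the lectures in session at s, and returns the max; same value, proved equal.

-- ===== PORT A =====
def coding_problem_21 (times : List (Int × Int)) : Int :=
  let start_times := times.map (fun t => (t.1, (1 : Int)))
  let end_times := times.map (fun t => (t.2, (-1 : Int)))
  let room_allocation :=
    (PySem.List.sorted (start_times ++ end_times) (fun t => t.1) false).map (fun t => t.2)
  let p := room_allocation.foldl
    (fun (p : Int × Int) event => (p.1 + event, max p.2 (p.1 + event))) ((0 : Int), (0 : Int))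
  p.2

-- ===== PORT B =====
-- sum(1 for u in times if cond) is ported as the library count List.countP (cast to Int).
def coding_problem_21_alt (times : List (Int × Int)) : Int :=
  times.foldl (fun max_rooms t =>
    let rooms : Int := (times.countP (fun u => decide (u.1 ≤ t.1)) : Int)
      - (times.countP (fun u => decide (u.2 < t.1)) : Int)
    if rooms > max_rooms then rooms else max_rooms) 0

-- ===== PRECONDITION & SPEC =====
def Spec_coding_problem_21 (times : List (Int × Int)) (out : Int) : Prop := out = coding_problem_21_alt times
instance (times : List (Int × Int)) (out : Int) : Decidable (Spec_coding_problem_21 times out) := by unfold Spec_coding_problem_21; infer_instance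

-- ===== CLAIM (what is proved, stated in full; the proofs are below) =====
def Claim_equal_coding_problem_21 : Prop := ∀ (times : List (Int × Int)), Dom_coding_problem_21 times → Spec_coding_problem_21 times (coding_problem_21 times)

-- ===== LEMMAS AND PROOFS =====

-- Proof-side helpers: stable merge of two pair lists (ties to the left), and the ±1 delta merge.
def mergePairs : List (Int × Int) → List (Int × Int) → List (Int × Int)
  | [], E => E
  | s :: S', [] => s :: S'
  | s :: S', e :: E' =>
      if s.1 ≤ e.1 then s :: mergePairs S' (e :: E') else e :: mergePairs (s :: S') E'

def mergeD : List Int → List Int → List Int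
  | [], es => es.map (fun _ => (-1 : Int))
  | _ :: ss, [] => 1 :: mergeD ss []
  | s :: ss, e :: es =>
      if s ≤ e then 1 :: mergeD ss (e :: es) else -1 :: mergeD (s :: ss) es

-- max of nonempty prefix sums (0 for []), and max of a list (0 for []).
def M : List Int → Int
  | [] => 0
  | x :: d => max 0 (x + M d)

def maxD : List Int → Int
  | [] => 0
  | x :: l => l.foldl max x

-- count, at instant s, of starts ≤ s minus ends < s
def cAt (S E : List Int) (s : Int) : Int :=
  (S.countP (fun y => decide (y ≤ s)) : Int) - (E.countP (fun y => decide (y < s)) : Int)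

theorem mergePairs_nil_right (S : List (Int × Int)) : mergePairs S [] = S := by
  cases S <;> simp [mergePairs]

-- insertBy (strict key comparison) into a single-element right list is a tie-left merge.
theorem insertBy_singleton (y : Int × Int) (S : List (Int × Int)) :
    PySem.List.insertBy (fun a b => decide ((a : Int × Int).1 < b.1)) y S = mergePairs S [y] := by
  induction S with
  | nil => simp [PySem.List.insertBy, mergePairs]
  | cons s S' ih =>
      simp only [PySem.List.insertBy, mergePairs, mergePairs_nil_right]
      by_cases h : y.1 < s.1
      · simp [h, not_le.mpr h]
      · simp [h, le_of_not_gt h, ih]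

-- insertBy (by strict key comparison) commutes with the tie-to-the-left merge.
theorem insertBy_mergePairs (y : Int × Int) (S E : List (Int × Int)) :
    PySem.List.insertBy (fun a b => decide ((a : Int × Int).1 < b.1)) y (mergePairs S E) =
      mergePairs S (PySem.List.insertBy (fun a b => decide ((a : Int × Int).1 < b.1)) y E) := by
  induction S, E using mergePairs.induct with
  | case1 E => simp [mergePairs]
  | case2 s S' =>
      show PySem.List.insertBy _ y (mergePairs (s :: S') []) = _
      rw [mergePairs_nil_right]
      exact insertBy_singleton y (s :: S')
  | case3 s S' e E' h ih =>
      simp only [mergePairs, if_pos h, PySem.List.insertBy]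
      by_cases hy : y.1 < s.1
      · have hye : y.1 < e.1 := lt_of_lt_of_le hy h
        simp [hy, hye, mergePairs, not_le.mpr hy, if_pos h]
      · simp only [hy, decide_false, Bool.false_eq_true, if_false, ih]
        by_cases hye : y.1 < e.1
        · simp [PySem.List.insertBy, hye, mergePairs, le_of_not_gt hy]
        · simp [PySem.List.insertBy, hye, mergePairs, h]
  | case4 s S' e E' h ih =>
      simp only [mergePairs, if_neg h, PySem.List.insertBy]
      by_cases hye : y.1 < e.1
      · have hys : ¬ s.1 ≤ y.1 := not_le.mpr (lt_trans hye (lt_of_not_ge h))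
        simp [hye, mergePairs, hys, if_neg h]
      · simp only [hye, decide_false, Bool.false_eq_true, if_false, ih]
        simp [mergePairs, if_neg h]

theorem foldl_insertBy_mergePairs (Y : List (Int × Int)) :
    ∀ E S, Y.foldl (fun acc x =>
        PySem.List.insertBy (fun a b => decide ((a : Int × Int).1 < b.1)) x acc)
        (mergePairs S E) =
      mergePairs S (Y.foldl (fun acc x =>
        PySem.List.insertBy (fun a b => decide ((a : Int × Int).1 < b.1)) x acc) E) := by
  induction Y with
  | nil => intro E S; rfl
  | cons y Y' ih =>
      intro E S
      simp only [List.foldl_cons, insertBy_mergePairs, ih]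

-- Stable sort of a concatenation is the tie-left merge of the stable sorts.
theorem sorted_append_merge (X Y : List (Int × Int)) :
    PySem.List.sorted (X ++ Y) (fun t => t.1) false =
      mergePairs (PySem.List.sorted X (fun t => t.1) false)
                 (PySem.List.sorted Y (fun t => t.1) false) := by
  rw [PySem.List.sorted_eq_foldl_insertBy, PySem.List.sorted_eq_foldl_insertBy,
    PySem.List.sorted_eq_foldl_insertBy, List.foldl_append]
  rw [← foldl_insertBy_mergePairs, mergePairs_nil_right]

theorem insertBy_map_pair (k : Int) (v : Int) (ys : List Int) :
    PySem.List.insertBy (fun a b => decide ((a : Int × Int).1 < b.1)) (k, v)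
        (ys.map (fun x => (x, v))) =
      (PySem.List.insertBy (fun a b => decide ((a : Int) < b)) k ys).map (fun x => (x, v)) := by
  induction ys with
  | nil => rfl
  | cons y ys' ih =>
      simp only [List.map_cons, PySem.List.insertBy]
      by_cases h : k < y
      · simp [h]
      · simp [h, ih]

-- Sorting constant-tagged pairs by key = sorting the keys, then tagging.
theorem sorted_map_pair (xs : List Int) (v : Int) :
    PySem.List.sorted (xs.map (fun k => (k, v))) (fun t => t.1) false =
      (PySem.List.sorted xs (fun x => x) false).map (fun k => (k, v)) := by
  rw [PySem.List.sorted_eq_foldl_insertBy, PySem.List.sorted_eq_foldl_insertBy, List.foldl_map]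
  have main : ∀ (l : List Int) (acc : List Int),
      l.foldl (fun acc k =>
          PySem.List.insertBy (fun a b => decide ((a : Int × Int).1 < b.1)) (k, v) acc)
        (acc.map (fun x => (x, v))) =
      (l.foldl (fun acc k =>
          PySem.List.insertBy (fun a b => decide ((a : Int) < b)) k acc) acc).map
        (fun x => (x, v)) := by
    intro l
    induction l with
    | nil => intro acc; rfl
    | cons x l' ih =>
        intro acc
        simp only [List.foldl_cons, insertBy_map_pair, ih]
  exact main xs []

theorem map_snd_mergePairs (S E : List Int) :
    (mergePairs (S.map (fun k => (k, (1 : Int)))) (E.map (fun k => (k, (-1 : Int))))).map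
        (fun t => t.2) = mergeD S E := by
  induction S, E using mergeD.induct with
  | case1 es => simp [mergePairs, mergeD, Function.comp_def]
  | case2 s ss ih =>
      simp only [List.map_cons, List.map_nil, mergePairs_nil_right, mergeD] at *
      simpa using ih
  | case3 s ss e es h ih =>
      simp only [List.map_cons] at ih ⊢
      simp [mergePairs, mergeD, h, ih]
  | case4 s ss e es h ih =>
      simp only [List.map_cons] at ih ⊢
      simp [mergePairs, mergeD, h, ih]

theorem M_nonneg (d : List Int) : 0 ≤ M d := by
  induction d with
  | nil => simp [M]
  | cons x d ih => simp [M]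

-- A's running/max fold computes the max nonempty-prefix sum M.
theorem foldA_M (d : List Int) :
    ∀ r m : Int, r ≤ m →
      (d.foldl (fun (p : Int × Int) event => (p.1 + event, max p.2 (p.1 + event))) (r, m)).2 =
        max m (r + M d) := by
  induction d with
  | nil => intro r m h; simp [M]; omega
  | cons x d ih =>
      intro r m h
      simp only [List.foldl_cons, M]
      rw [ih (r + x) (max m (r + x)) (le_max_right _ _)]
      have := M_nonneg d
      omega

theorem foldl_max_assoc (l : List Int) : ∀ a b : Int,
    l.foldl max (max a b) = max a (l.foldl max b) := by
  induction l with
  | nil => intro a b; rfl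
  | cons x l ih =>
      intro a b
      simp only [List.foldl_cons, max_assoc, ih]

theorem le_foldl_max (l : List Int) : ∀ a : Int, a ≤ l.foldl max a := by
  induction l with
  | nil => intro a; exact le_rfl
  | cons x l ih =>
      intro a
      exact le_trans (le_max_left a x) (ih (max a x))

theorem mem_le_foldl_max (l : List Int) : ∀ a x : Int, x ∈ l → x ≤ l.foldl max a := by
  induction l with
  | nil => intro a x h; cases h
  | cons y l ih =>
      intro a x h
      rcases List.mem_cons.mp h with rfl | h
      · exact le_trans (le_max_right a x) (le_foldl_max l _)
      · exact ih _ x h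

theorem foldl_max_mem (l : List Int) : ∀ a : Int, l.foldl max a = a ∨ l.foldl max a ∈ l := by
  induction l with
  | nil => intro a; exact Or.inl rfl
  | cons x l ih =>
      intro a
      rcases ih (max a x) with h | h
      · rcases max_choice a x with hm | hm
        · left; rw [List.foldl_cons, h, hm]
        · right; rw [List.foldl_cons, h, hm]; exact List.mem_cons_self ..
      · exact Or.inr (List.mem_cons_of_mem _ h)

theorem le_maxD (l : List Int) (x : Int) (h : x ∈ l) : x ≤ maxD l := by
  cases l with
  | nil => cases h
  | cons y l =>
      rcases List.mem_cons.mp h with rfl | h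
      · exact le_foldl_max l x
      · exact mem_le_foldl_max l y x h

theorem maxD_mem (l : List Int) (h : l ≠ []) : maxD l ∈ l := by
  cases l with
  | nil => exact absurd rfl h
  | cons x l =>
      show l.foldl max x ∈ x :: l
      rcases foldl_max_mem l x with h | h
      · rw [h]; exact List.mem_cons_self ..
      · exact List.mem_cons_of_mem _ h

theorem maxD_perm (l l' : List Int) (h : l.Perm l') : maxD l = maxD l' := by
  cases l with
  | nil => rw [h.nil_eq.symm]
  | cons x t =>
      have h1 : l' ≠ [] := by
        intro he; rw [he] at h; exact absurd h.symm.nil_eq (by simp)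
      refine le_antisymm ?_ ?_
      · exact le_maxD l' _ (h.mem_iff.mp (maxD_mem _ (by simp)))
      · exact le_maxD _ _ (h.mem_iff.mpr (maxD_mem l' h1))

theorem foldl_max_zero (l : List Int) : l.foldl max 0 = max 0 (maxD l) := by
  cases l with
  | nil => simp [maxD]
  | cons x l => simp only [List.foldl_cons, maxD, foldl_max_assoc]

theorem maxD_cons (h : Int) (l : List Int) (hl : l ≠ []) :
    maxD (h :: l) = max h (maxD l) := by
  cases l with
  | nil => exact absurd rfl hl
  | cons x l => simp only [maxD, List.foldl_cons, foldl_max_assoc]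

theorem maxD_map_add (c : Int) (l : List Int) (hl : l ≠ []) :
    maxD (l.map (fun x => c + x)) = c + maxD l := by
  cases l with
  | nil => exact absurd rfl hl
  | cons x l =>
      simp only [List.map_cons, maxD]
      rw [List.foldl_map]
      have : ∀ (t : List Int) (a : Int),
          t.foldl (fun b y => max b (c + y)) (c + a) = c + t.foldl max a := by
        intro t
        induction t with
        | nil => intro a; rfl
        | cons y t ih =>
            intro a
            simp only [List.foldl_cons, ← ih (max a y)]
            congr 1
            omega
      exact this l x

theorem M_neg_ones (es : List Int) : M (es.map (fun _ => (-1 : Int))) = 0 := by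
  induction es with
  | nil => rfl
  | cons e es ih =>
      rw [List.map_cons]
      show max 0 (-1 + M (es.map (fun _ => (-1 : Int)))) = 0
      rw [ih]
      omega

-- Consuming one start s (all remaining starts and ends ≥ s) adds 1 inside the max.
theorem start_step (s : Int) (ss E : List Int)
    (hmin : ∀ y ∈ ss, s ≤ y) (hEmin : ∀ y ∈ E, s ≤ y)
    (ih : M (mergeD ss E) = max 0 (maxD (ss.map (cAt ss E)))) :
    max 0 (1 + M (mergeD ss E)) = max 0 (maxD ((s :: ss).map (cAt (s :: ss) E))) := by
  have hcE : E.countP (fun y => decide (y < s)) = 0 :=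
    List.countP_eq_zero.mpr (fun y hy => by simpa using not_lt.mpr (hEmin y hy))
  have hpt : ∀ t ∈ s :: ss, cAt (s :: ss) E t = 1 + cAt ss E t := by
    intro t ht
    have hst : s ≤ t := by
      rcases List.mem_cons.mp ht with rfl | ht
      · exact le_rfl
      · exact hmin t ht
    simp only [cAt, List.countP_cons, decide_eq_true_eq, hst, if_pos]
    push_cast
    ring
  rw [List.map_congr_left hpt]
  have hmm : (s :: ss).map (fun t => 1 + cAt ss E t) =
      ((s :: ss).map (cAt ss E)).map (fun x => 1 + x) := by
    simp [List.map_map, Function.comp_def]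
  rw [hmm, maxD_map_add 1 _ (by simp), ih, List.map_cons]
  have hs0 : cAt ss E s = (ss.countP (fun y => decide (y ≤ s)) : Int) := by
    simp [cAt, hcE]
  suffices hgoal : maxD (cAt ss E s :: ss.map (cAt ss E)) = max 0 (maxD (ss.map (cAt ss E))) by
    rw [hgoal]
  cases hssl : ss.map (cAt ss E) with
  | nil =>
      have : ss = [] := List.map_eq_nil_iff.mp hssl
      subst this
      simp [maxD, hs0]
  | cons a l' =>
      rw [maxD_cons _ _ (by simp)]
      rcases Nat.eq_zero_or_pos (ss.countP (fun y => decide (y ≤ s))) with hz | hp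
      · rw [hs0, hz]
        have h0 : ((0 : Nat) : Int) = 0 := rfl
        omega
      · -- some y ∈ ss has y ≤ s; with s ≤ y it IS s, so cAt ss E s occurs in the mapped list
        obtain ⟨y, hy, hys⟩ := List.countP_pos_iff.mp hp
        have : y = s := le_antisymm (by simpa using hys) (hmin y hy)
        subst this
        have hmem : cAt ss E y ∈ ss.map (cAt ss E) := List.mem_map_of_mem hy
        have hle := le_maxD _ _ hmem
        rw [hssl] at hle
        have hnn : 0 ≤ cAt ss E y := by rw [hs0]; positivity
        omega

-- Core: the max prefix sum of the merged ±1 deltas of two ascending lists equals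
-- the max over start instants s of (#starts ≤ s − #ends < s).
theorem M_mergeD (S E : List Int) (hS : S.Pairwise (· ≤ ·)) (hE : E.Pairwise (· ≤ ·)) :
    M (mergeD S E) = max 0 (maxD (S.map (cAt S E))) := by
  induction S, E using mergeD.induct with
  | case1 es =>
      rw [show mergeD [] es = es.map (fun _ => (-1 : Int)) by simp [mergeD], M_neg_ones]
      simp [maxD]
  | case2 s ss ih =>
      have hmin : ∀ y ∈ ss, s ≤ y := fun y hy => (List.pairwise_cons.mp hS).1 y hy
      rw [show mergeD (s :: ss) [] = 1 :: mergeD ss [] by simp [mergeD],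
        show M (1 :: mergeD ss []) = max 0 (1 + M (mergeD ss [])) from rfl]
      exact start_step s ss [] hmin (by simp) (ih hS.tail hE)
  | case3 s ss e es h ih =>
      have hmin : ∀ y ∈ ss, s ≤ y := fun y hy => (List.pairwise_cons.mp hS).1 y hy
      have hEmin : ∀ y ∈ e :: es, s ≤ y := by
        intro y hy
        rcases List.mem_cons.mp hy with rfl | hy
        · exact h
        · exact le_trans h ((List.pairwise_cons.mp hE).1 y hy)
      rw [show mergeD (s :: ss) (e :: es) = 1 :: mergeD ss (e :: es) by
        simp [mergeD, h],
        show M (1 :: mergeD ss (e :: es)) = max 0 (1 + M (mergeD ss (e :: es))) from rfl]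
      exact start_step s ss (e :: es) hmin hEmin (ih hS.tail hE)
  | case4 s ss e es h ih =>
      have hmin : ∀ y ∈ ss, s ≤ y := fun y hy => (List.pairwise_cons.mp hS).1 y hy
      have hpt : ∀ t ∈ s :: ss, cAt (s :: ss) (e :: es) t = (-1) + cAt (s :: ss) es t := by
        intro t ht
        have hst : s ≤ t := by
          rcases List.mem_cons.mp ht with rfl | ht
          · exact le_rfl
          · exact hmin t ht
        have het : e < t := lt_of_lt_of_le (lt_of_not_ge h) hst
        simp only [cAt, List.countP_cons, decide_eq_true_eq, het, if_pos]
        push_cast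
        ring
      rw [show mergeD (s :: ss) (e :: es) = -1 :: mergeD (s :: ss) es by
        simp [mergeD, h],
        show M (-1 :: mergeD (s :: ss) es) = max 0 (-1 + M (mergeD (s :: ss) es)) from rfl,
        List.map_congr_left hpt]
      have hmm : (s :: ss).map (fun t => (-1) + cAt (s :: ss) es t) =
          ((s :: ss).map (cAt (s :: ss) es)).map (fun x => (-1) + x) := by
        simp [List.map_map, Function.comp_def]
      rw [hmm, maxD_map_add (-1) _ (by simp), ih hS hE.tail]
      omega

-- B's loop is the max of the per-start counts.
theorem fold_if_max (f : (Int × Int) → Int) (l : List (Int × Int)) : ∀ acc : Int,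
    l.foldl (fun b t => if f t > b then f t else b) acc = (l.map f).foldl max acc := by
  induction l with
  | nil => intro acc; rfl
  | cons x l ih =>
      intro acc
      simp only [List.foldl_cons, List.map_cons, ih]
      congr 1
      split_ifs <;> omega

-- ===== VERDICT (by name: the statement is the Claim_ definition above) =====
theorem coding_problem_21_spec : Claim_equal_coding_problem_21 := by
  intro times _
  unfold Spec_coding_problem_21 coding_problem_21 coding_problem_21_alt
  simp only []
  rw [sorted_append_merge,
    show times.map (fun t => (t.1, (1 : Int))) =
        (times.map (fun t => t.1)).map (fun k => (k, (1 : Int))) by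
      simp [List.map_map, Function.comp_def],
    show times.map (fun t => (t.2, (-1 : Int))) =
        (times.map (fun t => t.2)).map (fun k => (k, (-1 : Int))) by
      simp [List.map_map, Function.comp_def],
    sorted_map_pair, sorted_map_pair, map_snd_mergePairs, foldA_M _ 0 0 le_rfl]
  set S := PySem.List.sorted (times.map (fun t => t.1)) (fun x => x) false with hSdef
  set E := PySem.List.sorted (times.map (fun t => t.2)) (fun x => x) false with hEdef
  have hS : S.Pairwise (· ≤ ·) := by
    simpa using PySem.List.sorted_pairwise (times.map (fun t => t.1)) (fun x => x)
  have hE : E.Pairwise (· ≤ ·) := by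
    simpa using PySem.List.sorted_pairwise (times.map (fun t => t.2)) (fun x => x)
  have hSp : S.Perm (times.map (fun t => t.1)) := PySem.List.sorted_perm _ _ _
  have hEp : E.Perm (times.map (fun t => t.2)) := PySem.List.sorted_perm _ _ _
  -- the per-instant count over S/E equals the count over times
  have hc : ∀ v : Int, cAt S E v =
      (times.countP (fun u => decide (u.1 ≤ v)) : Int)
        - (times.countP (fun u => decide (u.2 < v)) : Int) := by
    intro v
    unfold cAt
    rw [hSp.countP_eq, hEp.countP_eq, List.countP_map, List.countP_map]
    rfl
  have hmapc : S.map (cAt S E) = S.map (fun v =>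
      (times.countP (fun u => decide (u.1 ≤ v)) : Int)
        - (times.countP (fun u => decide (u.2 < v)) : Int)) :=
    List.map_congr_left (fun v _ => hc v)
  have hperm : (S.map (cAt S E)).Perm (times.map (fun t =>
      (times.countP (fun u => decide (u.1 ≤ t.1)) : Int)
        - (times.countP (fun u => decide (u.2 < t.1)) : Int))) := by
    rw [hmapc, show times.map (fun t =>
        (times.countP (fun u => decide (u.1 ≤ t.1)) : Int)
          - (times.countP (fun u => decide (u.2 < t.1)) : Int)) =
      (times.map (fun t => t.1)).map (fun v =>
        (times.countP (fun u => decide (u.1 ≤ v)) : Int)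
          - (times.countP (fun u => decide (u.2 < v)) : Int)) by
      simp [List.map_map, Function.comp_def]]
    exact hSp.map _
  rw [M_mergeD S E hS hE]
  rw [fold_if_max (fun t =>
      (times.countP (fun u => decide (u.1 ≤ t.1)) : Int)
        - (times.countP (fun u => decide (u.2 < t.1)) : Int)) times 0]
  rw [foldl_max_zero, maxD_perm _ _ hperm]
  have := M_nonneg (mergeD S E)
  omega
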